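-- pv_equiv track=rewrite | github.com/jmarq76/Learning_Programming | AulasPython/Parte2/Semana2/primeiro_lex.py | primeiro_lex
-- ===== SOURCE A (Python) =====
-- def primeiro_lex(lista):
--     i = 1
--     for string in lista:
--         while i < len(lista):
--             if string > lista[i]:
--                 break
--             i += 1
--         if i == len(lista):
--             break
--
--     return string
-- ===== SOURCE B (Python) =====
-- def primeiro_lex(lista):
--     for i, s in enumerate(lista):
--         if i == 0 or s < menor:
--             menor = s
--     return menor
-- ===== Notes on version B (the rewrite author's own statement) =====
-- stated objective: simpler
-- what changed: Replaces A's nested scan with a shared cross-iteration index (an accidental-but-correct first-minimum search) by a single running-minimum pass over the list.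
import Mathlib
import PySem

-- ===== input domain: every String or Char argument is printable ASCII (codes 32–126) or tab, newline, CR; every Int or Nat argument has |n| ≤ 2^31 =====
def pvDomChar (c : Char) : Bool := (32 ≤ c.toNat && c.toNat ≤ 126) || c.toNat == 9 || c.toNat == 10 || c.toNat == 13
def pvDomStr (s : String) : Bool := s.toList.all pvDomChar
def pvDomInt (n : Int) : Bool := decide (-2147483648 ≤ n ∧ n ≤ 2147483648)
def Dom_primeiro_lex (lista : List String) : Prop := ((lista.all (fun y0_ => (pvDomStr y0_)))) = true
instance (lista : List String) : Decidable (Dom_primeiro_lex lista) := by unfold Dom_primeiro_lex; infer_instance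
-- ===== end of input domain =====

-- B replaces A's nested scan with a shared cross-iteration index by a single running-minimum pass (same O(n) cost, plainly a minimum).

-- ===== PORT A =====
-- inner `while i < len(lista): if string > lista[i]: break; i += 1` (access guarded by the while condition, so in range)
def pvInnerA (lista : List String) (string : String) (i : Nat) : Nat :=
  if _h : i < lista.length then
    if lista[i]! < string then i else pvInnerA lista string (i + 1)
  else i
termination_by lista.length - i

-- outer `for string in lista: …; if i == len(lista): break` with the shared index i; returns the last bound `string`
def pvOuterA (lista : List String) : List String → Nat → String → String
  | [], _, cur => cur
  | s :: rest, i, _ =>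
    let i' := pvInnerA lista s i
    if i' = lista.length then s else pvOuterA lista rest i' s

-- on [] Python raises UnboundLocalError (`string` never bound); that input is outside Pre_, "" is a dead default
def primeiro_lex (lista : List String) : String := pvOuterA lista lista 1 ""

-- ===== PORT B =====
-- `for i, s in enumerate(lista): if i == 0 or s < menor: menor = s` ; `menor` unbound on [] (outside Pre_), "" is a dead default
def primeiro_lex_alt (lista : List String) : String :=
  (PySem.List.enumerate lista 0).foldl (fun menor p => if p.1 = 0 ∨ p.2 < menor then p.2 else menor) ""

-- ===== PRECONDITION & SPEC =====
-- Pre_ excludes only the empty list, on which A raises UnboundLocalError (B raises the same there)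
def Pre_primeiro_lex (lista : List String) : Prop := lista ≠ []
instance (lista : List String) : Decidable (Pre_primeiro_lex lista) := by unfold Pre_primeiro_lex; infer_instance
def pvWitness_primeiro_lex : List String := ["b", "a", "c"]

def Spec_primeiro_lex (lista : List String) (out : String) : Prop := out = primeiro_lex_alt lista
instance (lista : List String) (out : String) : Decidable (Spec_primeiro_lex lista out) := by unfold Spec_primeiro_lex; infer_instance

-- ===== CLAIM (what is proved, stated in full; the proofs are below) =====
def Claim_equal_primeiro_lex : Prop := ∀ (lista : List String), Dom_primeiro_lex lista → Pre_primeiro_lex lista → Spec_primeiro_lex lista (primeiro_lex lista)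

-- ===== LEMMAS AND PROOFS =====

-- the running-minimum step of B, value-wise a two-argument min
def pvMin2 (a s : String) : String := if s < a then s else a

-- canonical first-minimum of a nonempty list
def pvLMin : List String → String
  | [] => ""
  | x :: xs => xs.foldl pvMin2 x

-- ---- pvInnerA characterization ----
theorem pvInnerA_ge (lista : List String) (s : String) (i : Nat) : i ≤ pvInnerA lista s i := by
  fun_induction pvInnerA lista s i with
  | case1 => omega
  | case2 _ _ _ ih => omega
  | case3 => omega

theorem pvInnerA_le (lista : List String) (s : String) (i : Nat) (h : i ≤ lista.length) :
    pvInnerA lista s i ≤ lista.length := by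
  fun_induction pvInnerA lista s i with
  | case1 => omega
  | case2 _ h1 _ ih => exact ih (by omega)
  | case3 => omega

theorem pvInnerA_mid (lista : List String) (s : String) (i : Nat) :
    ∀ u, i ≤ u → u < pvInnerA lista s i → ¬ lista[u]! < s := by
  fun_induction pvInnerA lista s i with
  | case1 _ _ _ => intro u h1 h2; omega
  | case2 j _ hlt ih =>
    intro u h1 h2
    rcases Nat.eq_or_lt_of_le h1 with rfl | h1'
    · exact hlt
    · exact ih u h1' h2
  | case3 => intro u h1 h2; omega

theorem pvInnerA_stop (lista : List String) (s : String) (i : Nat)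
    (h : pvInnerA lista s i < lista.length) : lista[pvInnerA lista s i]! < s := by
  fun_induction pvInnerA lista s i with
  | case1 _ _ hlt => exact hlt
  | case2 _ _ _ ih => exact ih h
  | case3 j hj => omega

theorem pvInnerA_gt_self (lista : List String) (i : Nat) (h : i < lista.length) :
    i < pvInnerA lista lista[i]! i := by
  have hge := pvInnerA_ge lista lista[i]! (i + 1)
  rw [pvInnerA, dif_pos h, if_neg (lt_irrefl _)]
  omega

-- ---- foldl pvMin2 facts ----
theorem pvFold_le_init (xs : List String) (a : String) : xs.foldl pvMin2 a ≤ a := by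
  induction xs generalizing a with
  | nil => simp
  | cons y ys ih =>
    simp only [List.foldl_cons]
    refine le_trans (ih (pvMin2 a y)) ?_
    unfold pvMin2
    by_cases hlt : y < a
    · rw [if_pos hlt]; exact le_of_lt hlt
    · rw [if_neg hlt]

theorem pvFold_le_mem (xs : List String) (a y : String) (hy : y ∈ xs) : xs.foldl pvMin2 a ≤ y := by
  induction xs generalizing a with
  | nil => simp at hy
  | cons z zs ih =>
    simp only [List.foldl_cons]
    rcases List.mem_cons.mp hy with heq | hy'
    · subst heq
      unfold pvMin2
      by_cases hlt : y < a
      · rw [if_pos hlt]; exact pvFold_le_init zs y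
      · rw [if_neg hlt]; exact le_trans (pvFold_le_init zs a) (not_lt.mp hlt)
    · exact ih (pvMin2 a z) hy'

theorem pvFold_mem (xs : List String) (a : String) :
    xs.foldl pvMin2 a = a ∨ xs.foldl pvMin2 a ∈ xs := by
  induction xs generalizing a with
  | nil => left; rfl
  | cons z zs ih =>
    simp only [List.foldl_cons]
    rcases ih (pvMin2 a z) with h | h
    · rw [h]; unfold pvMin2
      by_cases hlt : z < a
      · rw [if_pos hlt]; right; exact List.mem_cons_self
      · rw [if_neg hlt]; left; rfl
    · right; exact List.mem_cons_of_mem _ h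

-- an element that is a lower bound of the whole list equals pvLMin
theorem pvLMin_char (l : List String) (e : String) (he : e ∈ l) (hle : ∀ y ∈ l, e ≤ y) :
    pvLMin l = e := by
  cases l with
  | nil => simp at he
  | cons x xs =>
    show xs.foldl pvMin2 x = e
    apply le_antisymm
    · rcases List.mem_cons.mp he with heq | he'
      · subst heq; exact pvFold_le_init xs e
      · exact pvFold_le_mem xs x e he'
    · rcases pvFold_mem xs x with h | h
      · rw [h]; exact hle x List.mem_cons_self
      · exact hle _ (List.mem_cons_of_mem _ h)

-- bundle: if l[j]! is ≤ every element then l[j]! is pvLMin l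
theorem pvLMin_of_idx (l : List String) (j : Nat) (hj : j < l.length)
    (hall : ∀ u, u < l.length → l[j]! ≤ l[u]!) : pvLMin l = l[j]! := by
  apply pvLMin_char
  · rw [getElem!_pos l j hj]; exact List.getElem_mem hj
  · intro y hy
    rcases List.mem_iff_getElem.mp hy with ⟨u, hu, rfl⟩
    rw [← getElem!_pos l u hu]
    exact hall u hu

-- ---- A's outer loop returns pvLMin ----
-- invariant: the current shared index i satisfies k ≤ i < n and l[i]! is strictly below every earlier element
theorem pvOuterA_eq (l : List String) :
    ∀ (rest : List String) (k i : Nat) (cur : String), rest = l.drop k → k ≤ i →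
      i < l.length → (∀ u, u < i → l[i]! < l[u]!) →
      pvOuterA l rest i cur = pvLMin l := by
  intro rest
  induction rest with
  | nil =>
    intro k i cur hrest hki hin _
    exfalso
    have := congrArg List.length hrest
    simp at this
    omega
  | cons s rest' ih =>
    intro k i cur hrest hki hin hinv
    have hkn : k < l.length := by
      by_contra h
      rw [List.drop_eq_nil_of_le (by omega)] at hrest
      exact List.cons_ne_nil _ _ hrest
    rw [List.drop_eq_getElem_cons hkn] at hrest
    injection hrest with hs0 hrest'
    have hs : s = l[k]! := by rw [getElem!_pos l k hkn]; exact hs0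
    show (if pvInnerA l s i = l.length then s else pvOuterA l rest' (pvInnerA l s i) s) = pvLMin l
    rcases Nat.eq_or_lt_of_le hki with rfl | hklt
    · -- k = i : the inner while really scans from i
      have hji : k < pvInnerA l s k := by rw [hs]; exact pvInnerA_gt_self l k hkn
      have hjle : pvInnerA l s k ≤ l.length := pvInnerA_le l s k (by omega)
      by_cases hjn : pvInnerA l s k = l.length
      · rw [if_pos hjn, hs]
        symm
        apply pvLMin_of_idx l k hkn
        intro u hu
        rcases lt_trichotomy u k with h | rfl | h
        · exact le_of_lt (hinv u h)
        · exact le_rfl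
        · have hmid := pvInnerA_mid l s k u (by omega) (by omega)
          rw [hs] at hmid
          exact not_lt.mp hmid
      · rw [if_neg hjn]
        have hstop := pvInnerA_stop l s k (by omega)
        rw [hs] at hstop
        apply ih (k + 1) (pvInnerA l s k) s hrest' (by omega) (by omega)
        intro u hu
        have hju : l[pvInnerA l s k]! < l[k]! := by rw [hs] at hu ⊢; exact hstop
        rcases lt_trichotomy u k with h | rfl | h
        · exact lt_trans hju (hinv u h)
        · exact hju
        · have hmid := pvInnerA_mid l s k u (by omega) hu
          rw [hs] at hmid
          exact lt_of_lt_of_le hju (not_lt.mp hmid)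
    · -- k < i : l[i]! < l[k]! = s, the inner while breaks immediately, i unchanged
      have hbreak : l[i]! < s := hs ▸ hinv k hklt
      have hinner : pvInnerA l s i = i := by rw [pvInnerA, dif_pos hin, if_pos hbreak]
      rw [hinner, if_neg (by omega)]
      exact ih (k + 1) i s hrest' (by omega) hin hinv

theorem primeiro_lex_eq_pvLMin (l : List String) (hne : l ≠ []) : primeiro_lex l = pvLMin l := by
  cases l with
  | nil => exact absurd rfl hne
  | cons x xs =>
    have h0 : (0 : Nat) < (x :: xs).length := by simp
    have hx : x = (x :: xs)[0]! := by rw [getElem!_pos (x :: xs) 0 h0]; rfl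
    show (if pvInnerA (x :: xs) x 1 = (x :: xs).length then x
          else pvOuterA (x :: xs) xs (pvInnerA (x :: xs) x 1) x) = pvLMin (x :: xs)
    have hj1 : 1 ≤ pvInnerA (x :: xs) x 1 := pvInnerA_ge (x :: xs) x 1
    have hjle : pvInnerA (x :: xs) x 1 ≤ (x :: xs).length :=
      pvInnerA_le (x :: xs) x 1 (by simp)
    by_cases hjn : pvInnerA (x :: xs) x 1 = (x :: xs).length
    · rw [if_pos hjn, hx]
      symm
      apply pvLMin_of_idx (x :: xs) 0 h0
      intro u hu
      rcases Nat.eq_zero_or_pos u with rfl | hu1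
      · exact le_rfl
      · have hmid := pvInnerA_mid (x :: xs) x 1 u (by omega) (by omega)
        rw [hx] at hmid
        exact not_lt.mp hmid
    · rw [if_neg hjn]
      have hstop := pvInnerA_stop (x :: xs) x 1 (by omega)
      rw [hx] at hstop
      apply pvOuterA_eq (x :: xs) xs 1 (pvInnerA (x :: xs) x 1) x rfl hj1 (by omega)
      intro u hu
      rcases Nat.eq_zero_or_pos u with rfl | hu1
      · rw [← hx]; rw [hx] at hstop ⊢; exact hstop
      · have hmid := pvInnerA_mid (x :: xs) x 1 u (by omega) hu
        rw [hx] at hmid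
        exact lt_of_lt_of_le hstop (not_lt.mp hmid)

-- ---- B equals pvLMin ----
theorem pvAlt_tail (xs : List String) :
    ∀ (k : Int) (a : String), 1 ≤ k →
      (PySem.List.enumerate xs k).foldl (fun menor p => if p.1 = 0 ∨ p.2 < menor then p.2 else menor) a
        = xs.foldl pvMin2 a := by
  induction xs with
  | nil => intro k a _; simp [PySem.List.enumerate_nil]
  | cons y ys ih =>
    intro k a hk
    simp only [PySem.List.enumerate_cons, List.foldl_cons]
    have hk0 : (k : Int) ≠ 0 := by omega
    by_cases hya : y < a
    · rw [if_pos (Or.inr hya), ih (k + 1) y (by omega)]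
      have : pvMin2 a y = y := by unfold pvMin2; rw [if_pos hya]
      rw [this]
    · have hcond : ¬ (k = 0 ∨ y < a) := by rintro (h | h); exact hk0 h; exact hya h
      rw [if_neg hcond, ih (k + 1) a (by omega)]
      have : pvMin2 a y = a := by unfold pvMin2; rw [if_neg hya]
      rw [this]

theorem primeiro_lex_alt_eq_pvLMin (l : List String) (hne : l ≠ []) :
    primeiro_lex_alt l = pvLMin l := by
  cases l with
  | nil => exact absurd rfl hne
  | cons x xs =>
    show (PySem.List.enumerate (x :: xs) 0).foldl
        (fun menor p => if p.1 = 0 ∨ p.2 < menor then p.2 else menor) "" = xs.foldl pvMin2 x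
    simp only [PySem.List.enumerate_cons, List.foldl_cons]
    rw [if_pos (Or.inl trivial)]
    exact pvAlt_tail xs (0 + 1) x (by omega)

-- ===== VERDICT (by name: the statement is the Claim_ definition above) =====
theorem primeiro_lex_spec : Claim_equal_primeiro_lex := by
  intro lista _ hpre
  unfold Spec_primeiro_lex
  rw [primeiro_lex_eq_pvLMin lista hpre, primeiro_lex_alt_eq_pvLMin lista hpre]
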